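-- pv_equiv track=rewrite | github.com/NickyBoy89/java2go | gowriter.py | toGoTypes
-- ===== SOURCE A (Python) =====
-- def toGoTypes(type):
--     # Is some sort of array
--     if "[]" in type:
--         return "[]" + toGoTypes(type[:-2])
--     # Lowering all the strings to handle the object versions of java types
--     # Ex: Boolean for boolean
--     if type.lower() == "double":
--         return "float64"
--     elif type.lower() == "float":
--         return "float32"
--     elif type.lower() == "long":
--         return "int64"
--     elif type.lower() == "string":
--         return "string"
--     elif type.lower() == "boolean":
--         return "bool"
--     elif type.lower() == "char":
--         return "rune"
--     elif type.lower() == "boolean":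
--         return "bool"
--     elif type.lower() == "integer":
--         return "int"
--     elif type.lower() == "short":
--         return "int16"
--     else:
--         return type
-- ===== SOURCE B (Python) =====
-- _TYPE_MAP = {
--     "double": "float64",
--     "float": "float32",
--     "long": "int64",
--     "string": "string",
--     "boolean": "bool",
--     "char": "rune",
--     "integer": "int",
--     "short": "int16",
-- }
--
--
-- def toGoTypes(type):
--     # Strip all array markers iteratively, accumulating the Go prefix,
--     # then map the base name through a table (default: the original name).
--     prefix = ""
--     while "[]" in type:
--         prefix += "[]"
--         type = type[:-2]
--     return prefix + _TYPE_MAP.get(type.lower(), type)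
-- ===== Notes on version B (the rewrite author's own statement) =====
-- stated objective: idiomatic
-- what changed: Replaces the non-tail recursion that prepends the array marker at each step with an iterative loop accumulating the prefix, and replaces the nine-way if/elif chain with a single table lookup with the original name as default.
import Mathlib
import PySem

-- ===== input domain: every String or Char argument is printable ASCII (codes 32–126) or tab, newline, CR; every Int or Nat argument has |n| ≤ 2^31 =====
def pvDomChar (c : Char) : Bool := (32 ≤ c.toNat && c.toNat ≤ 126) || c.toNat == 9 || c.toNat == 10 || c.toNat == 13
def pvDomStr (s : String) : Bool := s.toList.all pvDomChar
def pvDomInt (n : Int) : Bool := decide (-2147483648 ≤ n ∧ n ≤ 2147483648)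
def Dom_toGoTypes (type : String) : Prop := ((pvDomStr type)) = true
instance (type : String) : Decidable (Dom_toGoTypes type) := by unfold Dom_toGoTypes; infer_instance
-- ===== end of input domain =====

-- B replaces A's prepend-recursion with an accumulator loop and A's if/elif chain with a table lookup (idiomatic; same cost).

-- ===== PORT A =====
-- helper for the recursion: '"[]" in type' forces type.length ≥ 2
theorem pvInfix_len {cs : List Char} (h : PySem.Chars.isIn "[]".toList cs = true) :
    2 ≤ cs.length := by
  have := (PySem.Chars.isIn_iff_infix _ _).mp h
  simpa using this.length_le

-- A's recursion, on code points (type[:-2] is slice none (-2))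
def toGoTypesCoreA (cs : List Char) : List Char :=
  if h : PySem.Chars.isIn "[]".toList cs = true then
    "[]".toList ++ toGoTypesCoreA (PySem.Chars.slice cs none (some (-2)))
  else
    let l := PySem.Chars.lower cs
    if l = "double".toList then "float64".toList
    else if l = "float".toList then "float32".toList
    else if l = "long".toList then "int64".toList
    else if l = "string".toList then "string".toList
    else if l = "boolean".toList then "bool".toList
    else if l = "char".toList then "rune".toList
    else if l = "boolean".toList then "bool".toList
    else if l = "integer".toList then "int".toList
    else if l = "short".toList then "int16".toList
    else cs
termination_by cs.length
decreasing_by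
  have h2 := pvInfix_len h
  simp [PySem.Chars.slice_eq_listSlice]
  rw [PySem.List.slice_to_neg_ofNat cs 2 (by omega)]
  simp
  omega

def toGoTypes (type : String) : String := String.ofList (toGoTypesCoreA type.toList)

-- ===== PORT B =====
def pvTypeMap : PySem.Dict (List Char) (List Char) :=
  PySem.Dict.mk
    [("double".toList, "float64".toList),
     ("float".toList, "float32".toList),
     ("long".toList, "int64".toList),
     ("string".toList, "string".toList),
     ("boolean".toList, "bool".toList),
     ("char".toList, "rune".toList),
     ("integer".toList, "int".toList),
     ("short".toList, "int16".toList)]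

-- B's while loop: tail recursion accumulating the prefix
def toGoTypesCoreB (pre cs : List Char) : List Char :=
  if h : PySem.Chars.isIn "[]".toList cs = true then
    toGoTypesCoreB (pre ++ "[]".toList) (PySem.Chars.slice cs none (some (-2)))
  else
    pre ++ pvTypeMap.getD (PySem.Chars.lower cs) cs
termination_by cs.length
decreasing_by
  have h2 := pvInfix_len h
  simp [PySem.Chars.slice_eq_listSlice]
  rw [PySem.List.slice_to_neg_ofNat cs 2 (by omega)]
  simp
  omega

def toGoTypes_alt (type : String) : String := String.ofList (toGoTypesCoreB [] type.toList)

-- ===== PRECONDITION & SPEC =====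
def Spec_toGoTypes (type : String) (out : String) : Prop := out = toGoTypes_alt type
instance (type : String) (out : String) : Decidable (Spec_toGoTypes type out) := by unfold Spec_toGoTypes; infer_instance

-- ===== CLAIM (what is proved, stated in full; the proofs are below) =====
def Claim_equal_toGoTypes : Prop := ∀ (type : String), Dom_toGoTypes type → Spec_toGoTypes type (toGoTypes type)

-- ===== LEMMAS AND PROOFS =====
-- the table lookup equals A's if/elif chain on a '[]'-free input
set_option maxHeartbeats 1000000 in
theorem lookup_eq_chain (cs : List Char) :
    pvTypeMap.getD (PySem.Chars.lower cs) cs =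
      (let l := PySem.Chars.lower cs
       if l = "double".toList then "float64".toList
       else if l = "float".toList then "float32".toList
       else if l = "long".toList then "int64".toList
       else if l = "string".toList then "string".toList
       else if l = "boolean".toList then "bool".toList
       else if l = "char".toList then "rune".toList
       else if l = "integer".toList then "int".toList
       else if l = "short".toList then "int16".toList
       else cs) := by
  unfold pvTypeMap
  by_cases h1 : PySem.Chars.lower cs = "double".toList
  · simp [PySem.Dict.getD, PySem.Dict.get?_mk_cons, h1]
  by_cases h2 : PySem.Chars.lower cs = "float".toList
  · simp [PySem.Dict.getD, PySem.Dict.get?_mk_cons, h2, h1]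
  by_cases h3 : PySem.Chars.lower cs = "long".toList
  · simp [PySem.Dict.getD, PySem.Dict.get?_mk_cons, h3, h1, h2]
  by_cases h4 : PySem.Chars.lower cs = "string".toList
  · simp [PySem.Dict.getD, PySem.Dict.get?_mk_cons, h4, h1, h2, h3]
  by_cases h5 : PySem.Chars.lower cs = "boolean".toList
  · simp [PySem.Dict.getD, PySem.Dict.get?_mk_cons, h5, h1, h2, h3, h4]
  by_cases h6 : PySem.Chars.lower cs = "char".toList
  · simp [PySem.Dict.getD, PySem.Dict.get?_mk_cons, h6, h1, h2, h3, h4, h5]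
  by_cases h7 : PySem.Chars.lower cs = "integer".toList
  · simp [PySem.Dict.getD, PySem.Dict.get?_mk_cons, h7, h1, h2, h3, h4, h5, h6]
  by_cases h8 : PySem.Chars.lower cs = "short".toList
  · simp [PySem.Dict.getD, PySem.Dict.get?_mk_cons, h8, h1, h2, h3, h4, h5, h6, h7]
  · simp at h1 h2 h3 h4 h5 h6 h7 h8
    have e : ∀ (k : List Char), PySem.Chars.lower cs ≠ k → (k == PySem.Chars.lower cs) = false :=
      fun k hk => beq_eq_false_iff_ne.mpr (Ne.symm hk)
    simp [PySem.Dict.getD, PySem.Dict.get?, List.find?, e _ h1, e _ h2, e _ h3, e _ h4, e _ h5, e _ h6, e _ h7, e _ h8, h1, h2, h3, h4, h5, h6, h7, h8]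

theorem coreB_eq (cs pre : List Char) :
    toGoTypesCoreB pre cs = pre ++ toGoTypesCoreA cs := by
  rw [toGoTypesCoreB, toGoTypesCoreA]
  split_ifs with h
  · have h2 := pvInfix_len h
    have := coreB_eq (PySem.Chars.slice cs none (some (-2))) (pre ++ "[]".toList)
    rw [this, List.append_assoc]
  · rw [lookup_eq_chain]
termination_by cs.length
decreasing_by
  have h2 := pvInfix_len h
  simp [PySem.Chars.slice_eq_listSlice]
  rw [PySem.List.slice_to_neg_ofNat cs 2 (by omega)]
  simp
  omega

-- ===== VERDICT (by name: the statement is the Claim_ definition above) =====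
theorem toGoTypes_spec : Claim_equal_toGoTypes := by
  intro type _
  show _ = _
  unfold toGoTypes toGoTypes_alt
  rw [coreB_eq, List.nil_append]
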